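-- pv_equiv track=rewrite | github.com/yebeike/NeSy-Edge | experiments/rq123_e2e/stage4_full_api_20260311.py | _choose_best_ref
-- ===== SOURCE A (Python) =====
-- from typing import Dict, List, Tuple
--
-- def _choose_best_ref(alert: str, refs_list: List[Tuple[str, str]]) -> Tuple[str, str] | None:
--     if not refs_list:
--         return None
--     atoks = set((alert or "").lower().split())
--     best = None
--     best_score = -1
--     for rlog, rtpl in refs_list:
--         rtoks = set((rlog or "").lower().split())
--         s = len(atoks & rtoks)
--         if s > best_score:
--             best_score = s
--             best = (rlog, rtpl)
--     return best
-- ===== SOURCE B (Python) =====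
-- from typing import List, Tuple
--
--
-- def _choose_best_ref(alert: str, refs_list: List[Tuple[str, str]]) -> Tuple[str, str] | None:
--     if not refs_list:
--         return None
--     atoks = set((alert or "").lower().split())
--     scored = [(len(atoks & set((rlog or "").lower().split())), (rlog, rtpl))
--               for rlog, rtpl in refs_list]
--     ranked = sorted(scored, key=lambda t: t[0], reverse=True)
--     return ranked[0][1]
-- ===== Notes on version B (the rewrite author's own statement) =====
-- stated objective: alternative
-- what changed: Replaces A's running-argmax loop with best/best_score state by building a scored list once and taking the ref of the head of a stable descending sort (stability preserves A's first-wins tie-break).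
import Mathlib
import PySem

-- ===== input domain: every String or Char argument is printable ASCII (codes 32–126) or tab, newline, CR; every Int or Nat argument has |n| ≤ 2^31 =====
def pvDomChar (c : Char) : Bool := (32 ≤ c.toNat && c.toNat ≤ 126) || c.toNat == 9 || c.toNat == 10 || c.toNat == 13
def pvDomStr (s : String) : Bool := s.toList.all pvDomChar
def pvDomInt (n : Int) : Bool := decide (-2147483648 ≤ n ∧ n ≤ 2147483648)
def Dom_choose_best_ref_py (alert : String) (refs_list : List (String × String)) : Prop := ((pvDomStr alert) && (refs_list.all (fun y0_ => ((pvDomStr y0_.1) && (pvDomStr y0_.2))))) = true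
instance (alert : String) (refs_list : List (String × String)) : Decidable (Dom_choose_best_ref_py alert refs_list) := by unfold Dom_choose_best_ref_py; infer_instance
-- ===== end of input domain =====

-- B replaces A's running best/best_score argmax loop by scoring every ref once and taking
-- the head of a stable descending sort (objective: alternative decomposition, same result).

-- ===== PORT A =====
-- A's loop, carrying (best, best_score); `rlog or ""` on a str equals rlog, ported as rlog.
def choose_best_ref_py (alert : String) (refs_list : List (String × String)) : Option (String × String) :=
  if refs_list = [] then none
  else
    let atoks : PySem.Set String := PySem.Set.ofList (PySem.Str.split₀ (PySem.Str.lower alert))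
    (refs_list.foldl
      (fun (st : Option (String × String) × Int) r =>
        let rtoks : PySem.Set String := PySem.Set.ofList (PySem.Str.split₀ (PySem.Str.lower r.1))
        let s : Int := PySem.Set.len (PySem.Set.inter atoks rtoks)
        if s > st.2 then (some r, s) else st)
      (none, -1)).1

-- ===== PORT B =====
def choose_best_ref_py_alt (alert : String) (refs_list : List (String × String)) : Option (String × String) :=
  if refs_list = [] then none
  else
    let atoks : PySem.Set String := PySem.Set.ofList (PySem.Str.split₀ (PySem.Str.lower alert))
    let scored : List (Int × (String × String)) :=
      refs_list.map (fun r =>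
        (PySem.Set.len (PySem.Set.inter atoks (PySem.Set.ofList (PySem.Str.split₀ (PySem.Str.lower r.1)))), r))
    match PySem.List.sorted scored (fun t => t.1) true with
    | [] => none
    | t :: _ => some t.2

-- ===== PRECONDITION & SPEC =====
def Spec_choose_best_ref_py (alert : String) (refs_list : List (String × String)) (out : Option (String × String)) : Prop := out = choose_best_ref_py_alt alert refs_list
instance (alert : String) (refs_list : List (String × String)) (out : Option (String × String)) : Decidable (Spec_choose_best_ref_py alert refs_list out) := by unfold Spec_choose_best_ref_py; infer_instance

-- ===== CLAIM (what is proved, stated in full; the proofs are below) =====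
def Claim_equal_choose_best_ref_py : Prop := ∀ (alert : String) (refs_list : List (String × String)), Dom_choose_best_ref_py alert refs_list → Spec_choose_best_ref_py alert refs_list (choose_best_ref_py alert refs_list)

-- ===== LEMMAS AND PROOFS =====

-- first element of maximal first component ("first-wins argmax")
def pickFM {β : Type} : List (Int × β) → Option (Int × β)
  | [] => none
  | p :: t =>
    match pickFM t with
    | none => some p
    | some q => if p.1 < q.1 then some q else some p

theorem pickFM_mem {β : Type} (ps : List (Int × β)) (q : Int × β)
    (h : pickFM ps = some q) : q ∈ ps := by
  induction ps with
  | nil => simp [pickFM] at h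
  | cons p t ih =>
    simp only [pickFM] at h
    cases hp : pickFM t with
    | none => rw [hp] at h; simp at h; simp [h]
    | some q' =>
      rw [hp] at h
      by_cases hlt : p.1 < q'.1
      · simp [hlt] at h; subst h; exact List.mem_cons_of_mem _ (ih hp)
      · simp [hlt] at h; simp [h]

theorem pickFM_ne_none {β : Type} (p : Int × β) (t : List (Int × β)) :
    pickFM (p :: t) ≠ none := by
  simp only [pickFM]
  cases pickFM t with
  | none => simp
  | some q => by_cases h : p.1 < q.1 <;> simp [h]

-- A's loop, generalized over the accumulator
theorem a_fold {β : Type} (ps : List (Int × β)) (b : Option β) (s : Int) :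
    (ps.foldl (fun st p => if p.1 > st.2 then (some p.2, p.1) else st) (b, s)).1
      = (match pickFM ps with
         | none => b
         | some q => if q.1 > s then some q.2 else b) := by
  induction ps generalizing b s with
  | nil => simp [pickFM]
  | cons p t ih =>
    simp only [List.foldl_cons, pickFM]
    by_cases h1 : p.1 > s
    · simp only [h1, if_pos]
      rw [ih (some p.2) p.1]
      cases hp : pickFM t with
      | none => simp [h1]
      | some q =>
        by_cases h2 : p.1 < q.1
        · have : q.1 > s := by omega
          simp [h2, this]
        · have : ¬ q.1 > p.1 := by omega
          simp [h2, h1]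
    · simp only [h1, if_false]
      rw [ih b s]
      cases hp : pickFM t with
      | none => simp [h1]
      | some q =>
        by_cases h2 : p.1 < q.1
        · simp [h2]
        · have : ¬ q.1 > s := by omega
          simp [h2, h1, this]

-- head of the descending insertion step
theorem head_insertBy {β : Type} (x : Int × β) (acc : List (Int × β)) :
    (PySem.List.insertBy (fun a b => decide ((fun t : Int × β => t.1) b < (fun t : Int × β => t.1) a)) x acc).head?
      = (match acc.head? with
         | none => some x
         | some y => if y.1 < x.1 then some x else some y) := by
  cases acc with
  | nil => simp [PySem.List.insertBy]
  | cons y ys =>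
    by_cases h : y.1 < x.1 <;> simp [PySem.List.insertBy, h]

-- head of the sort fold = running first-wins max over the heads
theorem head_sort_fold {β : Type} (ps : List (Int × β)) (acc : List (Int × β)) :
    (ps.foldl (fun acc x => PySem.List.insertBy (fun a b => decide ((fun t : Int × β => t.1) b < (fun t : Int × β => t.1) a)) x acc) acc).head?
      = ps.foldl
          (fun (h : Option (Int × β)) x =>
            match h with
            | none => some x
            | some y => if y.1 < x.1 then some x else some y)
          acc.head? := by
  induction ps generalizing acc with
  | nil => rfl
  | cons p t ih =>
    simp only [List.foldl_cons]
    rw [ih, head_insertBy]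

-- the running max equals pickFM
theorem run_max_eq {β : Type} (ps : List (Int × β)) :
    ∀ (h : Option (Int × β)),
      ps.foldl
        (fun (h : Option (Int × β)) x =>
          match h with
          | none => some x
          | some y => if y.1 < x.1 then some x else some y)
        h
      = (match h with
         | none => pickFM ps
         | some y => match pickFM ps with
                     | none => some y
                     | some q => if y.1 < q.1 then some q else some y) := by
  induction ps with
  | nil => intro h; cases h <;> simp [pickFM]
  | cons p t ih =>
    intro h
    simp only [List.foldl_cons, pickFM]
    cases h with
    | none =>
      rw [ih (some p)]
    | some y =>
      by_cases h1 : y.1 < p.1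
      · simp only [h1, if_pos]
        rw [ih (some p)]
        cases hp : pickFM t with
        | none => simp [h1]
        | some q =>
          by_cases h2 : p.1 < q.1
          · have : y.1 < q.1 := by omega
            simp [h2, this]
          · simp [h2, h1]
      · simp only [h1, if_false]
        rw [ih (some y)]
        cases hp : pickFM t with
        | none => simp [h1]
        | some q =>
          by_cases h2 : p.1 < q.1
          · by_cases h3 : y.1 < q.1 <;> simp [h2, h3]
          · have h3 : ¬ y.1 < q.1 := by omega
            simp [h2, h3, h1]

theorem head_sorted_rev_eq_pickFM {β : Type} (ps : List (Int × β)) :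
    (PySem.List.sorted ps (fun t => t.1) true).head? = pickFM ps := by
  rw [PySem.List.sorted_rev_eq_foldl_insertBy]
  rw [head_sort_fold]
  simpa using run_max_eq ps none

theorem score_nonneg (atoks rtoks : PySem.Set String) :
    0 ≤ PySem.Set.len (PySem.Set.inter atoks rtoks) := by
  simp [PySem.Set.len]

-- ===== VERDICT (by name: the statement is the Claim_ definition above) =====
theorem choose_best_ref_py_spec : Claim_equal_choose_best_ref_py := by
  intro alert refs_list _
  unfold Spec_choose_best_ref_py choose_best_ref_py choose_best_ref_py_alt
  cases refs_list with
  | nil => simp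
  | cons r0 rs =>
    simp only [reduceCtorEq, if_false]
    set atoks : PySem.Set String := PySem.Set.ofList (PySem.Str.split₀ (PySem.Str.lower alert)) with hatoks
    set f : (String × String) → Int × (String × String) :=
      fun r => (PySem.Set.len (PySem.Set.inter atoks (PySem.Set.ofList (PySem.Str.split₀ (PySem.Str.lower r.1)))), r) with hf
    have hmapfold :
        ((r0 :: rs).foldl
          (fun (st : Option (String × String) × Int) r =>
            let rtoks : PySem.Set String := PySem.Set.ofList (PySem.Str.split₀ (PySem.Str.lower r.1))
            let s : Int := PySem.Set.len (PySem.Set.inter atoks rtoks)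
            if s > st.2 then (some r, s) else st)
          (none, -1)).1
        = (((r0 :: rs).map f).foldl
            (fun (st : Option (String × String) × Int) p =>
              if p.1 > st.2 then (some p.2, p.1) else st)
            (none, -1)).1 := by
      rw [List.foldl_map]
    rw [hmapfold, a_fold]
    cases hp : pickFM ((r0 :: rs).map f) with
    | none =>
      exact absurd hp (by simpa using pickFM_ne_none (f r0) (rs.map f))
    | some q =>
      have hq : q ∈ (r0 :: rs).map f := pickFM_mem _ _ hp
      have hq1 : 0 ≤ q.1 := by
        rcases List.mem_map.mp hq with ⟨r, _, hr⟩
        rw [← hr]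
        exact score_nonneg _ _
      have hhd : (PySem.List.sorted ((r0 :: rs).map f) (fun t => t.1) true).head? = some q := by
        rw [head_sorted_rev_eq_pickFM, hp]
      cases hs : PySem.List.sorted ((r0 :: rs).map f) (fun t => t.1) true with
      | nil => rw [hs] at hhd; simp at hhd
      | cons t ts =>
        rw [hs] at hhd
        simp only [List.head?_cons, Option.some.injEq] at hhd
        subst hhd
        have hgt : t.1 > -1 := by omega
        simp [hgt]
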